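-- pv_equiv track=rewrite | github.com/jenk1/module_visualizer | module_visualizer/helper.py | clean_imports
-- ===== SOURCE A (Python) =====
-- def clean_imports(lst):
--     """Add the documentation later Comment"""
--
--     mod_lst = []
--
--     while(lst != []):
--         if(',' in lst[0]):
--             if(lst[0][0:6] == 'import'):
--                 temp_ = lst[0][6:].split(',')
--                 for i in temp_:
--                     lst.append('import ' + i)
--
--                 lst[0] = 'Fixed'
--
--             if(lst[0][0:4] == 'from'):
--                 temp_ = lst[0].split('import')
--                 part_1 = temp_[0]
--                 part_2 = temp_[1].lstrip().rstrip().split(',')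
--                 for i in part_2:
--                     lst.append(str(part_1) + ' import ' + str(i))
--
--                 lst[0] = 'Fixed'
--
--         temp = lst[0].split()
--
--         if(len(temp) == 2 and temp[0] == 'import'):
--             mod_lst.append(temp[1])
--             lst[0] = 'Fixed'
--
--         elif(len(temp) == 4 and temp[0] == 'import' and temp[2] == 'as'):
--             mod_lst.append(temp[1])
--             lst[0] = 'Fixed'
--
--         elif(len(temp) == 4 and temp[0] == 'from'):
--             if(temp[3] != '*'):
--                 mod_lst.append(str(temp[1]) + '.' + str(temp[3]))
--             else:
--                 mod_lst.append(str(temp[1]))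
--             lst[0] = 'Fixed'
--
--         del lst[0]
--
--     return mod_lst
-- ===== SOURCE B (Python) =====
-- def _parse(line, mod_lst):
--     temp = line.split()
--     if len(temp) == 2 and temp[0] == 'import':
--         mod_lst.append(temp[1])
--     elif len(temp) == 4 and temp[0] == 'import' and temp[2] == 'as':
--         mod_lst.append(temp[1])
--     elif len(temp) == 4 and temp[0] == 'from':
--         if temp[3] != '*':
--             mod_lst.append(temp[1] + '.' + temp[3])
--         else:
--             mod_lst.append(temp[1])
--
--
-- def clean_imports(lst):
--     """Two-pass rewrite: classify/expand comma lines into a pending list, then parse; empties lst like the original."""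
--     lines = list(lst)
--     lst.clear()
--     mod_lst = []
--     pending = []
--     for line in lines:
--         if ',' in line and line[0:6] == 'import':
--             for piece in line[6:].split(','):
--                 pending.append('import ' + piece)
--         elif ',' in line and line[0:4] == 'from':
--             parts = line.split('import')
--             for piece in parts[1].strip().split(','):
--                 pending.append(parts[0] + ' import ' + piece)
--         else:
--             _parse(line, mod_lst)
--     for line in pending:
--         _parse(line, mod_lst)
--     return mod_lst
-- ===== Notes on version B (the rewrite author's own statement) =====
-- stated objective: faster
-- what changed: A interleaves expansion and parsing in one destructive while-queue that repeatedly does del lst[0] (an O(n) shift each iteration) and re-enqueues expansion strings into the list it is consuming; B snapshots the input, classifies each line once into a direct parse or a pending expansion list, then parses the pending strings in a second pass with a shared _parse helper.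
import Mathlib
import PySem

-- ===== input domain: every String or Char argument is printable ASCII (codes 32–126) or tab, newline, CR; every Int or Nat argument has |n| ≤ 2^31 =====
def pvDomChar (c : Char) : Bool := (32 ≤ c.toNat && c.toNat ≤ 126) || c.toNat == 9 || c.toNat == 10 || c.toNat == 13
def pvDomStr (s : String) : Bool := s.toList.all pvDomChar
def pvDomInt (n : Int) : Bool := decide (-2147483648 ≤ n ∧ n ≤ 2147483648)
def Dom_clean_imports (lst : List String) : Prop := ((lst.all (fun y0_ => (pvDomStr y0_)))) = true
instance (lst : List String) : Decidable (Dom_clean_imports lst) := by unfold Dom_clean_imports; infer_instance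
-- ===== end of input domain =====

-- B replaces A's destructive while-queue (whose repeated `del lst[0]` shifts the whole list each
-- iteration) by two passes over a snapshot: classify/expand, then parse the pending expansions; the
-- timing run measured B faster. A empties its argument in place and B mirrors that mutation in
-- Python; the equivalence proved here is about the return value.

-- ===== PORT A =====
-- A's while-loop: `lst` is the queue, `mod_lst` the accumulator; `fuel` only makes the loop total
-- (it is proven sufficient on every input satisfying Pre_; Python A diverges on some inputs outside it).
def cleanImportsGo (fuel : Nat) (lst : List String) (mod_lst : List String) : List String :=
  match fuel, lst with
  | 0, _ => mod_lst
  | _ + 1, [] => mod_lst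
  | fuel + 1, l0 :: rest =>
    let st :=
      if PySem.Str.isIn "," l0 then
        let st1 :=
          if PySem.Str.slice l0 (some 0) (some 6) == "import" then
            (("Fixed" : String),
             rest ++ ((PySem.Str.split? (PySem.Str.slice l0 (some 6)) ",").getD []).map
               (fun i => "import " ++ i))
          else (l0, rest)
        if PySem.Str.slice st1.1 (some 0) (some 4) == "from" then
          let temp_ := (PySem.Str.split? st1.1 "import").getD []
          let part_1 := temp_.headD ""
          match temp_[1]? with
          | some t1 =>
            (("Fixed" : String),
             st1.2 ++ ((PySem.Str.split? (PySem.Str.rstrip (PySem.Str.lstrip t1)) ",").getD []).map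
               (fun i => part_1 ++ " import " ++ i))
          | none => st1   -- Python raises IndexError here; such inputs are outside Pre_
        else st1
      else (l0, rest)
    let temp := PySem.Str.split₀ st.1
    let mod' :=
      match temp with
      | [t0, t1] => if t0 == "import" then mod_lst ++ [t1] else mod_lst
      | [t0, t1, t2, t3] =>
        if t0 == "import" && t2 == "as" then mod_lst ++ [t1]
        else if t0 == "from" then
          if t3 != "*" then mod_lst ++ [t1 ++ "." ++ t3] else mod_lst ++ [t1]
        else mod_lst
      | _ => mod_lst
    cleanImportsGo fuel st.2 mod'

def clean_imports (lst : List String) : List String :=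
  cleanImportsGo (1 + lst.length + ((lst.map (fun l => (PySem.Str.len l).toNat + 1)).sum)) lst []

-- ===== PORT B =====
-- B's parse helper `_parse` (appends at most one module name for one comma-free line)
def parseLine (line : String) (mod_lst : List String) : List String :=
  match PySem.Str.split₀ line with
  | [t0, t1] => if t0 == "import" then mod_lst ++ [t1] else mod_lst
  | [t0, t1, t2, t3] =>
    if t0 == "import" && t2 == "as" then mod_lst ++ [t1]
    else if t0 == "from" then
      if t3 != "*" then mod_lst ++ [t1 ++ "." ++ t3] else mod_lst ++ [t1]
    else mod_lst
  | _ => mod_lst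

-- B: one pass classifying each line (expansions of comma lines go to `pending`, plain lines are
-- parsed straight into `mod_lst`), then a second pass parsing the pending expansion strings.
def clean_imports_alt (lst : List String) : List String :=
  let acc := lst.foldl (fun (acc : List String × List String) line =>
    if PySem.Str.isIn "," line && (PySem.Str.slice line (some 0) (some 6) == "import") then
      (acc.1, acc.2 ++ ((PySem.Str.split? (PySem.Str.slice line (some 6)) ",").getD []).map
        (fun i => "import " ++ i))
    else if PySem.Str.isIn "," line && (PySem.Str.slice line (some 0) (some 4) == "from") then
      let parts := (PySem.Str.split? line "import").getD []
      (acc.1, acc.2 ++ ((PySem.Str.split? (PySem.Str.strip (parts.getD 1 "")) ",").getD []).map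
        (fun i => parts.headD "" ++ " import " ++ i))
    else (parseLine line acc.1, acc.2)) ([], [])
  acc.2.foldl (fun m l => parseLine l m) acc.1

-- ===== PRECONDITION & SPEC =====
-- Pre_ excludes exactly the inputs on which Python A never returns: a line containing ',' that
-- starts with 'from' must contain 'import' (else A raises IndexError on temp_[1]) and must have no
-- ',' before its first 'import' (else A's expansion re-expands forever and the while-loop diverges).
def Pre_clean_imports (lst : List String) : Prop :=
  ∀ l ∈ lst, PySem.Str.isIn "," l = true → PySem.Str.slice l (some 0) (some 4) = "from" →
    2 ≤ ((PySem.Str.split? l "import").getD []).length ∧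
    PySem.Str.isIn "," (((PySem.Str.split? l "import").getD []).headD "") = false
instance (lst : List String) : Decidable (Pre_clean_imports lst) := by
  unfold Pre_clean_imports; infer_instance

def pvWitness_clean_imports : List String :=
  ["import os", "from a import b, c", "import x,y", "import numpy as np", "from m import *", "x = 1"]

def Spec_clean_imports (lst : List String) (out : List String) : Prop := out = clean_imports_alt lst
instance (lst : List String) (out : List String) : Decidable (Spec_clean_imports lst out) := by
  unfold Spec_clean_imports; infer_instance

-- ===== CLAIM (what is proved, stated in full; the proofs are below) =====
def Claim_equal_clean_imports : Prop := ∀ (lst : List String), Dom_clean_imports lst → Pre_clean_imports lst → Spec_clean_imports lst (clean_imports lst)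

-- ===== LEMMAS AND PROOFS =====

-- helper notions the proofs use: the pending strings one line contributes, whether it is expanded,
-- and the direct-parse accumulator step
def expandable (l : String) : Bool :=
  PySem.Str.isIn "," l &&
    (PySem.Str.slice l (some 0) (some 6) == "import" || PySem.Str.slice l (some 0) (some 4) == "from")

def lineExps (l : String) : List String :=
  if PySem.Str.isIn "," l && (PySem.Str.slice l (some 0) (some 6) == "import") then
    ((PySem.Str.split? (PySem.Str.slice l (some 6)) ",").getD []).map (fun i => "import " ++ i)
  else if PySem.Str.isIn "," l && (PySem.Str.slice l (some 0) (some 4) == "from") then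
    ((PySem.Str.split? (PySem.Str.strip (((PySem.Str.split? l "import").getD []).getD 1 "")) ",").getD []).map
      (fun i => ((PySem.Str.split? l "import").getD []).headD "" ++ " import " ++ i)
  else []

def goodLine (l : String) : Prop :=
  PySem.Str.isIn "," l = true → PySem.Str.slice l (some 0) (some 4) = "from" →
    2 ≤ ((PySem.Str.split? l "import").getD []).length ∧
    PySem.Str.isIn "," (((PySem.Str.split? l "import").getD []).headD "") = false

def stepMod (m : List String) (l : String) : List String :=
  if expandable l then m else parseLine l m


theorem go_eq_succ (sep : List Char) (fuel : Nat) (c : Char) (rest cur : List Char) (acc : List (List Char)) :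
    PySem.Chars.splitOn.go sep (fuel+1) (c :: rest) cur acc =
      if sep.isPrefixOf (c :: rest) then
        PySem.Chars.splitOn.go sep fuel (List.drop sep.length (c :: rest)) [] (cur.reverse :: acc)
      else PySem.Chars.splitOn.go sep fuel rest (c :: cur) acc := by
  simp [PySem.Chars.splitOn.go]

theorem go_comma : ∀ (fuel : Nat) (l cur : List Char) (acc : List (List Char)),
    l.length < fuel → (∀ c ∈ cur, c ≠ ',') → (∀ p ∈ acc, ∀ c ∈ p, c ≠ ',') →
    ∀ p ∈ PySem.Chars.splitOn.go [','] fuel l cur acc, ∀ c ∈ p, c ≠ ',' := by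
  intro fuel
  induction fuel with
  | zero => intro l cur acc h; omega
  | succ fuel ih =>
    intro l cur acc hlen hcur hacc p hp
    match l with
    | [] =>
      simp [PySem.Chars.splitOn.go] at hp
      rcases hp with h | h
      · exact hacc p h
      · subst h; simpa using fun c hc => hcur c (by simpa using hc)
    | c :: rest =>
      rw [go_eq_succ] at hp
      by_cases hpre : List.isPrefixOf [','] (c :: rest)
      · rw [if_pos hpre] at hp
        have hc : c = ',' := by have := hpre; simp [List.isPrefixOf] at this; exact this.symm
        refine ih _ _ _ (by simp at hlen ⊢; omega) (by simp) ?_ p hp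
        intro q hq
        rcases List.mem_cons.mp hq with h | h
        · subst h; simpa using fun d hd => hcur d (by simpa using hd)
        · exact hacc q h
      · rw [if_neg hpre] at hp
        have hc : c ≠ ',' := by
          intro h; exact hpre (by simp [List.isPrefixOf, h])
        refine ih _ _ _ (by simp at hlen ⊢; omega) ?_ hacc p hp
        intro d hd
        rcases List.mem_cons.mp hd with h | h
        · subst h; exact hc
        · exact hcur d h

theorem go_len : ∀ (fuel : Nat) (sep l cur : List Char) (acc : List (List Char)), sep ≠ [] →
    (PySem.Chars.splitOn.go sep fuel l cur acc).length ≤ acc.length + l.length + 1 := by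
  intro fuel
  induction fuel with
  | zero => intro sep l cur acc _; simp [PySem.Chars.splitOn.go]
  | succ fuel ih =>
    intro sep l cur acc hsep
    match l with
    | [] => simp [PySem.Chars.splitOn.go]
    | c :: rest =>
      rw [go_eq_succ]
      split
      · have h1 : 1 ≤ sep.length := by cases sep with | nil => simp at hsep | cons a t => simp
        have := ih sep (List.drop sep.length (c :: rest)) [] (cur.reverse :: acc) hsep
        simp at this ⊢
        omega
      · have := ih sep rest (c :: cur) acc hsep
        simp at this ⊢
        omega

theorem go_piece_len : ∀ (fuel : Nat) (sep l cur : List Char) (acc : List (List Char)) (p : List Char),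
    p ∈ PySem.Chars.splitOn.go sep fuel l cur acc → p ∈ acc ∨ p.length ≤ cur.length + l.length := by
  intro fuel
  induction fuel with
  | zero =>
    intro sep l cur acc p hp
    simp [PySem.Chars.splitOn.go] at hp
    rcases hp with h | h
    · exact Or.inl h
    · right; subst h; simp
  | succ fuel ih =>
    intro sep l cur acc p hp
    match l with
    | [] =>
      simp [PySem.Chars.splitOn.go] at hp
      rcases hp with h | h
      · exact Or.inl h
      · right; subst h; simp
    | c :: rest =>
      rw [go_eq_succ] at hp
      split at hp
      · rcases ih sep _ _ _ p hp with h | h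
        · rcases List.mem_cons.mp h with h1 | h1
          · right; subst h1; simp
          · exact Or.inl h1
        · right; simp at h ⊢; omega
      · rcases ih sep _ _ _ p hp with h | h
        · exact Or.inl h
        · right; simp at h ⊢; omega

theorem toList_ofList (l : List Char) : (String.ofList l).toList = l := by
  simp

theorem isIn_comma_false_iff (s : String) : PySem.Str.isIn "," s = false ↔ ',' ∉ s.toList := by
  rw [← Bool.not_eq_true, PySem.Str.isIn_iff_infix]
  constructor
  · intro h hc; exact h (by simpa [List.singleton_infix_iff] using hc)
  · intro h hc
    exact h (by simpa [List.singleton_infix_iff] using hc)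

theorem mem_split_comma (s : String) (p : String)
    (hp : p ∈ (PySem.Str.split? s ",").getD []) : PySem.Str.isIn "," p = false := by
  simp [PySem.Str.split?, PySem.Chars.split?] at hp
  obtain ⟨q, hq, rfl⟩ := hp
  rw [isIn_comma_false_iff, toList_ofList]
  have : ("," : String).toList = [','] := by decide
  intro hc
  exact go_comma (s.toList.length + 1) s.toList [] [] (by omega) (by simp) (by simp) q
    (by simpa [PySem.Chars.splitOn, this] using hq) ',' hc rfl

theorem split_getD_length (s sep : String) (hsep : sep.toList ≠ []) :
    ((PySem.Str.split? s sep).getD []).length ≤ s.toList.length + 1 := by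
  simp [PySem.Str.split?, PySem.Chars.split?, List.isEmpty_iff, hsep, PySem.Chars.splitOn]
  have := go_len (s.toList.length + 1) sep.toList s.toList [] [] hsep
  simpa using this

theorem mem_split_length (s sep : String) (p : String)
    (hp : p ∈ (PySem.Str.split? s sep).getD []) : p.toList.length ≤ s.toList.length := by
  by_cases hsep : sep.toList = []
  · simp [PySem.Str.split?, PySem.Chars.split?, hsep] at hp
  have hsep' : ¬ sep = "" := fun h => hsep (by simp [h])
  simp [PySem.Str.split?, PySem.Chars.split?, List.isEmpty_iff, hsep'] at hp
  obtain ⟨q, hq, rfl⟩ := hp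
  rw [toList_ofList]
  rcases go_piece_len (s.toList.length + 1) sep.toList s.toList [] [] q
    (by simpa [PySem.Chars.splitOn] using hq) with h | h
  · simp at h
  · simpa using h

theorem isIn_comma_append (a b : String) (ha : PySem.Str.isIn "," a = false)
    (hb : PySem.Str.isIn "," b = false) : PySem.Str.isIn "," (a ++ b) = false := by
  rw [isIn_comma_false_iff] at ha hb ⊢
  rw [String.toList_append]
  simp [ha, hb]

theorem strip_length_le (s : String) : (PySem.Str.strip s).toList.length ≤ s.toList.length := by
  simp [PySem.Str.strip, PySem.Chars.strip, PySem.Chars.rstrip, PySem.Chars.lstrip]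
  calc (List.dropWhile PySem.Chars.isspace (List.dropWhile PySem.Chars.isspace s.toList).reverse).length
      ≤ (List.dropWhile PySem.Chars.isspace s.toList).reverse.length := List.length_dropWhile_le _ _
    _ ≤ s.toList.length := by simpa using List.length_dropWhile_le _ _

theorem fixed_not_from : (PySem.Str.slice "Fixed" (some 0) (some 4) == "from") = false := by decide

theorem split0_fixed : PySem.Str.split₀ "Fixed" = ["Fixed"] := by decide

-- one step of A's loop on a good line
theorem stepA (fuel : Nat) (l : String) (rest mod : List String) (hg : goodLine l) :
    cleanImportsGo (fuel + 1) (l :: rest) mod =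
      cleanImportsGo fuel (rest ++ lineExps l) (stepMod mod l) := by
  by_cases hc : PySem.Str.isIn "," l = true
  · by_cases himp : (PySem.Str.slice l (some 0) (some 6) == "import") = true
    · simp only [cleanImportsGo, hc, himp, if_true, fixed_not_from, lineExps, stepMod, expandable,
        Bool.true_and]
      simp [split0_fixed]
    · by_cases hfrom : (PySem.Str.slice l (some 0) (some 4) == "from") = true
      · obtain ⟨hlen2, _⟩ := hg hc (by simpa using hfrom)
        have h1 : ((PySem.Str.split? l "import").getD [])[1]? =
            some (((PySem.Str.split? l "import").getD []).getD 1 "") := by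
          rw [List.getD_eq_getElem?_getD, List.getElem?_eq_getElem (by omega)]
          simp
        simp only [cleanImportsGo, hc, himp, hfrom, if_true, Bool.false_eq_true, if_false, h1,
          lineExps, stepMod, expandable, Bool.true_and]
        simp [split0_fixed, PySem.Str.strip, PySem.Chars.strip, PySem.Str.rstrip, PySem.Str.lstrip]
      · simp only [cleanImportsGo, hc, himp, hfrom, Bool.false_eq_true, if_false,
          lineExps, stepMod, expandable, Bool.true_and, Bool.false_or, if_true]
        simp [parseLine]
  · simp only [cleanImportsGo, hc, lineExps, stepMod, expandable, Bool.false_eq_true, if_false,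
      Bool.false_and]
    simp [parseLine]

-- the expansion strings of a good line contain no comma
theorem lineExps_comma_free (l : String) (hg : goodLine l) :
    ∀ e ∈ lineExps l, PySem.Str.isIn "," e = false := by
  intro e he
  unfold lineExps at he
  split at he
  · simp only [List.mem_map] at he
    obtain ⟨i, hi, rfl⟩ := he
    exact isIn_comma_append _ _ (by decide) (mem_split_comma _ _ hi)
  · split at he
    · next hcond =>
      rw [Bool.and_eq_true] at hcond
      obtain ⟨_, hhd⟩ := hg hcond.1 (by simpa using hcond.2)
      simp only [List.mem_map] at he
      obtain ⟨i, hi, rfl⟩ := he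
      exact isIn_comma_append _ _
        (isIn_comma_append _ _ hhd (by decide)) (mem_split_comma _ _ hi)
    · simp at he

-- how many strings a line can put on the queue
theorem lineExps_length (l : String) :
    (lineExps l).length ≤ (PySem.Str.len l).toNat + 1 := by
  have hlen : (PySem.Str.len l).toNat = l.toList.length := by simp [PySem.Str.len_eq]
  unfold lineExps
  split
  · rw [List.length_map]
    calc ((PySem.Str.split? (PySem.Str.slice l (some 6)) ",").getD []).length
        ≤ (PySem.Str.slice l (some 6)).toList.length + 1 :=
          split_getD_length _ _ (by decide)
      _ ≤ (PySem.Str.len l).toNat + 1 := by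
          rw [hlen]
          have : (PySem.Str.slice l (some 6)).toList = l.toList.drop 6 := by
            have h := PySem.List.slice_from l.toList (by norm_num : (0:Int) ≤ 6)
            simp [h]
          rw [this]
          simp
  · split
    · rw [List.length_map]
      set t1 := ((PySem.Str.split? l "import").getD []).getD 1 "" with ht1
      have ht1len : t1.toList.length ≤ l.toList.length := by
        by_cases h : 1 < ((PySem.Str.split? l "import").getD []).length
        · have hmem : t1 ∈ (PySem.Str.split? l "import").getD [] := by
            rw [ht1, List.getD_eq_getElem?_getD, List.getElem?_eq_getElem h]
            simp
          exact mem_split_length _ _ _ hmem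
        · rw [ht1, List.getD_eq_default _ _ (by omega)]
          simp
      calc ((PySem.Str.split? (PySem.Str.strip t1) ",").getD []).length
          ≤ (PySem.Str.strip t1).toList.length + 1 := split_getD_length _ _ (by decide)
        _ ≤ t1.toList.length + 1 := by have := strip_length_le t1; omega
        _ ≤ (PySem.Str.len l).toNat + 1 := by omega
    · simp

-- phase 2: on comma-free lines A's loop is a plain parse fold
theorem phase2 : ∀ (P : List String) (mod : List String) (fuel : Nat),
    (∀ l ∈ P, PySem.Str.isIn "," l = false) → P.length ≤ fuel →
    cleanImportsGo fuel P mod = P.foldl (fun m l => parseLine l m) mod := by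
  intro P
  induction P with
  | nil => intro mod fuel _ _; cases fuel <;> simp [cleanImportsGo]
  | cons l P ih =>
    intro mod fuel hP hfuel
    cases fuel with
    | zero => simp at hfuel
    | succ fuel =>
      have hc : PySem.Str.isIn "," l = false := hP l (by simp)
      have hc' : PySem.Chars.isIn [','] l.toList = false := by simpa using hc
      rw [stepA fuel l P mod (by intro h; rw [hc] at h; cases h)]
      have hE : lineExps l = [] := by
        unfold lineExps
        simp [hc']
      have hM : stepMod mod l = parseLine l mod := by
        unfold stepMod expandable
        simp [hc']
      rw [hE, hM, List.append_nil, List.foldl_cons]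
      exact ih _ _ (fun x hx => hP x (by simp [hx])) (by simp at hfuel; omega)

-- phase 1 + phase 2 combined: the queue invariant of A's while-loop
theorem phase1 : ∀ (lines P mod : List String) (fuel : Nat),
    (∀ l ∈ lines, goodLine l) → (∀ l ∈ P, PySem.Str.isIn "," l = false) →
    lines.length + P.length + (lines.flatMap lineExps).length ≤ fuel →
    cleanImportsGo fuel (lines ++ P) mod =
      (P ++ lines.flatMap lineExps).foldl (fun m l => parseLine l m) (lines.foldl stepMod mod) := by
  intro lines
  induction lines with
  | nil =>
    intro P mod fuel _ hP hfuel
    simpa using phase2 P mod fuel hP (by simp at hfuel; omega)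
  | cons l lines ih =>
    intro P mod fuel hg hP hfuel
    cases fuel with
    | zero => simp at hfuel
    | succ fuel =>
      rw [List.cons_append, stepA fuel l (lines ++ P) mod (hg l (by simp)), List.append_assoc]
      have := ih (P ++ lineExps l) (stepMod mod l) fuel
        (fun x hx => hg x (by simp [hx]))
        (by
          intro x hx
          rcases List.mem_append.mp hx with h | h
          · exact hP x h
          · exact lineExps_comma_free l (hg l (by simp)) x h)
        (by simp at hfuel ⊢; omega)
      rw [this]
      simp [List.append_assoc]

-- B computed as the same two folds
theorem altEq (lst : List String) :
    clean_imports_alt lst =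
      (lst.flatMap lineExps).foldl (fun m l => parseLine l m) (lst.foldl stepMod []) := by
  unfold clean_imports_alt
  rw [PySem.List.foldl_congr_mem lst _
    (fun acc line => (stepMod acc.1 line, acc.2 ++ lineExps line)) ([], []) ?_]
  · rw [PySem.List.foldl_prod_mk (f := fun m l => stepMod m l) (g := fun p l => p ++ lineExps l)]
    rw [PySem.List.foldl_append_eq_flatMap]
    simp
  · intro acc line _
    by_cases hc : PySem.Chars.isIn [','] line.toList = true
    · by_cases himp : PySem.Str.slice line (some 0) (some 6) = "import"
      · simp [hc, himp, stepMod, expandable, lineExps]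
      · by_cases hfrom : PySem.Str.slice line (some 0) (some 4) = "from"
        · simp [hc, himp, hfrom, stepMod, expandable, lineExps]
        · simp [hc, himp, hfrom, stepMod, expandable, lineExps]
    · simp [hc, stepMod, expandable, lineExps]


-- ===== VERDICT (by name: the statement is the Claim_ definition above) =====
theorem clean_imports_spec : Claim_equal_clean_imports := by
  intro lst _ hpre
  unfold Spec_clean_imports
  rw [altEq]
  have hgood : ∀ l ∈ lst, goodLine l := fun l hl => hpre l hl
  have hb : (lst.flatMap lineExps).length
      ≤ (lst.map (fun l => (PySem.Str.len l).toNat + 1)).sum := by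
    rw [List.length_flatMap]
    exact List.sum_le_sum (fun l _ => lineExps_length l)
  unfold clean_imports
  have := phase1 lst [] [] (1 + lst.length + (lst.map (fun l => (PySem.Str.len l).toNat + 1)).sum)
    hgood (by simp) (by simp only [List.length_nil]; omega)
  simpa using this
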